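-- pv_equiv track=rewrite | github.com/eun-younglee/python_coding_test | this_is_ct/2nd/memo.py | solution
-- ===== SOURCE A (Python) =====
-- import heapq
--
-- def solution(food_times, k):
--     if sum(food_times) < k:
--         return -1
--     q = []
--     for i in range(len(food_times)):
--         heapq.heappush(q, (food_times[i], i + 1))  # (food left, order)
--     total, previous = 0, 0
--     length = len(q)
--     while total + (q[0][0] - previous) * length <= k:
--         food_left, order = heapq.heappop(q)
--         total += (food_left - previous) * length
--         length -= 1
--         previous = food_left
--     result = sorted(q, key=lambda x: x[1])  # order by original order
--     return result[(k - total) % length][1]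
-- ===== SOURCE B (Python) =====
-- def solution(food_times, k):
--     # Binary search for the last moment t* at which the eaten time f(t)=sum(min(v,t))
--     # is still <= k, instead of simulating the heap; the survivors are just the foods
--     # with food_time > t*, already in original order, so no sorting at all.
--     if sum(food_times) < k:
--         return -1
--
--     def eaten(t):
--         return sum(min(v, t) for v in food_times)
--
--     lo, hi = k // len(food_times), max(food_times)
--     while hi - lo > 1:
--         mid = (lo + hi) // 2
--         if eaten(mid) <= k:
--             lo = mid
--         else:
--             hi = mid
--     remaining = [(v, i + 1) for i, v in enumerate(food_times) if v > lo]
--     return remaining[(k - eaten(lo)) % len(remaining)][1]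
-- ===== Notes on version B (the rewrite author's own statement) =====
-- stated objective: alternative
-- what changed: Replaces the heap simulation (heappush/heappop with running total/previous/length) by a binary search for the last moment t* with eaten(t)=sum(min(v,t))<=k; the survivors are simply the foods with value > t* kept in original order, so B needs no heap and no sorting at all.
-- outside the precondition, e.g. on solution([2, 1], 3): A raises IndexError, B returns 1; on solution([], 0): A raises IndexError, B raises ZeroDivisionError
import Mathlib
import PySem

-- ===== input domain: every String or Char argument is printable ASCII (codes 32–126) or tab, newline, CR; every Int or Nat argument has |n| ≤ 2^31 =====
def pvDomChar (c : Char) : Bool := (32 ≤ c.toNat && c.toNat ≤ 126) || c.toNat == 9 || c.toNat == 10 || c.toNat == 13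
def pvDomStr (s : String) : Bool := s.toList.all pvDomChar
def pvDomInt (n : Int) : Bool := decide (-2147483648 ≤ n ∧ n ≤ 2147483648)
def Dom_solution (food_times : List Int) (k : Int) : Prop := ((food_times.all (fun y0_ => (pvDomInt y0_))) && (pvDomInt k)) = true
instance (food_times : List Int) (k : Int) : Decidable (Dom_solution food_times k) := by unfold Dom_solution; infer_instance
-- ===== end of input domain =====

-- B replaces A's heap simulation by a binary search for the last moment t* with
-- eaten(t) = sum(min(v,t)) <= k; the survivors are the foods with value > t* in original
-- order, so no heap and no sorting at all ('alternative'; not claimed faster).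


-- ===== PORT A =====
-- heapq has no PySem primitive; the heap is modelled as a list kept in ascending Python tuple
-- (lexicographic) order: heappush = ordered insert, heappop = take the head.  This is exact here:
-- the heap entries (time, i+1) are pairwise distinct (distinct second components), and q is only
-- observed through q[0], min-pops, and a final full sort — all independent of the array layout.
def pvLexBefore (a b : Int × Int) : Bool :=
  decide (a.1 < b.1) || (!decide (b.1 < a.1) && decide (a.2 < b.2))

def pvHeapPush (q : List (Int × Int)) (x : Int × Int) : List (Int × Int) :=
  PySem.List.insertBy pvLexBefore x q

-- the 'while total + (q[0][0] - previous) * length <= k' loop; on [] Python would raise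
-- IndexError on q[0] (excluded by Pre_), here the state is returned unchanged
def pvEatLoop (k : Int) : List (Int × Int) → Int → Int → Int → List (Int × Int) × Int × Int
  | [], total, _previous, length => ([], total, length)
  | (fl, o) :: rest, total, previous, length =>
    if total + (fl - previous) * length ≤ k then
      pvEatLoop k rest (total + (fl - previous) * length) fl (length - 1)
    else ((fl, o) :: rest, total, length)

def solution (food_times : List Int) (k : Int) : Int :=
  if food_times.sum < k then -1
  else
    let q := (PySem.List.pyRange 0 (food_times.length : Int) 1).foldl
      (fun q i => pvHeapPush q (PySem.List.pyGetD food_times i 0, i + 1)) []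
    let r := pvEatLoop k q 0 0 (q.length : Int)
    let result := PySem.List.sorted r.1 (fun x => x.2) false
    -- result[(k - total) % length][1]; Pre_ guarantees length ≠ 0 and the index in range
    (PySem.List.pyGetD result (PySem.Int.mod (k - r.2.1) r.2.2) (0, 0)).2

-- ===== PORT B =====
-- eaten(t) = sum(min(v, t) for v in food_times)
def pvEaten (food_times : List Int) (t : Int) : Int :=
  (food_times.map (fun v => min v t)).sum

-- the 'while hi - lo > 1' binary-search loop (mid inlined); the Nat fuel only makes the
-- recursion structural: hi - lo shrinks every round, so (hi - lo).toNat rounds always suffice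
def pvSearchGo (food_times : List Int) (k : Int) : Nat → Int → Int → Int
  | 0, lo, _ => lo
  | fuel + 1, lo, hi =>
    if 1 < hi - lo then
      if pvEaten food_times (PySem.Int.floordiv (lo + hi) 2) ≤ k then
        pvSearchGo food_times k fuel (PySem.Int.floordiv (lo + hi) 2) hi
      else
        pvSearchGo food_times k fuel lo (PySem.Int.floordiv (lo + hi) 2)
    else lo

def pvSearch (food_times : List Int) (k lo hi : Int) : Int :=
  pvSearchGo food_times k (hi - lo).toNat lo hi

-- max(food_times) raises on []: unreachable under Pre_, the default 0 is never used
def solution_alt (food_times : List Int) (k : Int) : Int :=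
  if food_times.sum < k then -1
  else
    let lo := pvSearch food_times k
      (PySem.Int.floordiv k (PySem.List.len food_times))
      ((PySem.List.max? food_times (fun v => v)).getD 0)
    let remaining := ((PySem.List.enumerate food_times 0).filter
        (fun p => decide (lo < p.2))).map (fun p => (p.2, p.1 + 1))
    (PySem.List.pyGetD remaining
      (PySem.Int.mod (k - pvEaten food_times lo) (PySem.List.len remaining)) (0, 0)).2

-- ===== PRECONDITION & SPEC =====
-- Pre_ excludes exactly the inputs where A raises IndexError (and B ZeroDivisionError):
-- the heap is emptied iff the total eating time sum(food_times) equals k (the guard already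
-- returned -1 when sum < k), and the empty list with k <= 0 reaches q[0] on an empty q.
def Pre_solution (food_times : List Int) (k : Int) : Prop :=
  food_times.sum ≠ k ∧ (food_times = [] → 0 < k)
instance (food_times : List Int) (k : Int) : Decidable (Pre_solution food_times k) := by
  unfold Pre_solution; infer_instance

def pvWitness_solution : List Int × Int := ([3, 1, 2], 5)

def Spec_solution (food_times : List Int) (k : Int) (out : Int) : Prop := out = solution_alt food_times k
instance (food_times : List Int) (k : Int) (out : Int) : Decidable (Spec_solution food_times k out) := by unfold Spec_solution; infer_instance

-- ===== CLAIM (what is proved, stated in full; the proofs are below) =====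
def Claim_equal_solution : Prop := ∀ (food_times : List Int) (k : Int), Dom_solution food_times k → Pre_solution food_times k → Spec_solution food_times k (solution food_times k)

-- ===== LEMMAS AND PROOFS =====

-- A's push loop builds exactly the lexicographically sorted pair list
theorem pvPush_eq_sorted2 (food_times : List Int) :
    (PySem.List.pyRange 0 (food_times.length : Int) 1).foldl
      (fun q i => pvHeapPush q (PySem.List.pyGetD food_times i 0, i + 1)) []
    = PySem.List.sorted2
        ((PySem.List.enumerate food_times 0).map (fun p => (p.2, p.1 + 1)))
        (fun x => x.1) (fun x => x.2) false := by
  rw [PySem.List.sorted2]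
  rw [PySem.List.enumerate_eq_map_pyRange food_times 0]
  rw [List.map_map, List.foldl_map]
  simp only [PySem.List.len_eq]
  rfl

-- the sorted2 result, seen as the insertBy fold, is ordered by first component
theorem pvLex_insert_pairwise (x : Int × Int) (ys : List (Int × Int))
    (h : ys.Pairwise (fun a b => a.1 ≤ b.1)) :
    (PySem.List.insertBy pvLexBefore x ys).Pairwise (fun a b => a.1 ≤ b.1) := by
  induction ys with
  | nil => simp [PySem.List.insertBy]
  | cons y ys ih =>
    rw [List.pairwise_cons] at h
    simp only [PySem.List.insertBy]
    by_cases hb : pvLexBefore x y = true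
    · simp only [hb, if_pos]
      have hxy : x.1 ≤ y.1 := by
        simp only [pvLexBefore, Bool.or_eq_true, Bool.and_eq_true, Bool.not_eq_true',
          decide_eq_true_eq, decide_eq_false_iff_not] at hb
        omega
      refine List.pairwise_cons.mpr ⟨?_, List.pairwise_cons.mpr ⟨h.1, h.2⟩⟩
      intro z hz
      rcases List.mem_cons.mp hz with rfl | hz
      · exact hxy
      · exact le_trans hxy (h.1 z hz)
    · simp only [hb, if_neg, Bool.false_eq_true, not_false_iff]
      have hyx : y.1 ≤ x.1 := by
        simp only [pvLexBefore, Bool.or_eq_true, Bool.and_eq_true, Bool.not_eq_true',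
          decide_eq_true_eq, decide_eq_false_iff_not] at hb
        omega
      refine List.pairwise_cons.mpr ⟨?_, ih h.2⟩
      intro z hz
      rcases (PySem.List.mem_insertBy pvLexBefore x z ys).mp hz with rfl | hz
      · exact hyx
      · exact h.1 z hz
  
theorem pvFold_pairwise (L : List (Int × Int)) :
    ∀ acc : List (Int × Int), acc.Pairwise (fun a b => a.1 ≤ b.1) →
    (L.foldl (fun acc x => PySem.List.insertBy pvLexBefore x acc) acc).Pairwise
      (fun a b => a.1 ≤ b.1) := by
  induction L with
  | nil => intro acc h; exact h
  | cons x L ih =>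
    intro acc h
    exact ih _ (pvLex_insert_pairwise x acc h)

theorem pvSorted2_pairwise (L : List (Int × Int)) :
    (PySem.List.sorted2 L (fun x => x.1) (fun x => x.2) false).Pairwise
      (fun a b => a.1 ≤ b.1) := by
  have he : PySem.List.sorted2 L (fun x => x.1) (fun x => x.2) false
      = L.foldl (fun acc x => PySem.List.insertBy pvLexBefore x acc) [] := rfl
  rw [he]
  exact pvFold_pairwise L [] (by simp)

-- splitting the eaten-sum at a pivot t between the popped prefix and the surviving suffix
theorem pvSplit (pop S : List (Int × Int)) (t : Int)
    (h1 : ∀ x ∈ pop, x.1 ≤ t) (h2 : ∀ y ∈ S, t ≤ y.1) :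
    ((pop ++ S).map (fun p => min p.1 t)).sum
      = (pop.map (fun p => p.1)).sum + t * (S.length : Int) := by
  rw [List.map_append, List.sum_append]
  have hp : pop.map (fun p => min p.1 t) = pop.map (fun p => p.1) :=
    List.map_congr_left (fun x hx => min_eq_left (h1 x hx))
  have hsym : S.map (fun p => min p.1 t) = S.map (fun _ => t) :=
    List.map_congr_left (fun y hy => min_eq_right (h2 y hy))
  rw [hp, hsym, PySem.List.sum_map_const_int]
  ring

theorem pvEaten_mono (l : List Int) {v w : Int} (h : v ≤ w) : pvEaten l v ≤ pvEaten l w :=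
  List.sum_le_sum (fun i _ => min_le_min (le_refl i) h)

-- A's pop loop, run below the threshold t*, stops at the suffix of entries above t*
-- with a total congruent to eaten(t*) modulo the number of survivors
theorem pvEatLoop_spec (food : List Int) (k tstar : Int)
    (hts : ∀ v : Int, pvEaten food v ≤ k ↔ v ≤ tstar) :
    ∀ (S pop : List (Int × Int)) (prev total : Int),
    total = (pop.map (fun p => p.1)).sum + prev * (S.length : Int) →
    (∀ t : Int, pvEaten food t = ((pop ++ S).map (fun p => min p.1 t)).sum) →
    (∀ x ∈ pop, ∀ y ∈ S, x.1 ≤ y.1) →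
    (∀ x ∈ pop, x.1 ≤ tstar) →
    S.Pairwise (fun a b => a.1 ≤ b.1) →
    ∃ c : Int,
      pvEatLoop k S total prev (S.length : Int)
        = (S.filter (fun y => decide (tstar < y.1)),
           pvEaten food tstar + c * ((S.filter (fun y => decide (tstar < y.1))).length : Int),
           ((S.filter (fun y => decide (tstar < y.1))).length : Int)) := by
  intro S
  induction S with
  | nil =>
    intro pop prev total htot hfe hps hpt _
    refine ⟨0, ?_⟩
    simp only [pvEatLoop, List.length_nil, List.filter_nil, Nat.cast_zero]
    have : pvEaten food tstar = (pop.map (fun p => p.1)).sum := by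
      rw [hfe tstar, List.append_nil,
        List.map_congr_left (fun x hx => min_eq_left (hpt x hx))]
    simp [htot, this]
  | cons hd rest ih =>
    obtain ⟨t, o⟩ := hd
    intro pop prev total htot hfe hps hpt hpair
    rw [List.pairwise_cons] at hpair
    have hrest_ge : ∀ y ∈ (t, o) :: rest, t ≤ y.1 := by
      intro y hy
      rcases List.mem_cons.mp hy with rfl | hy
      · exact le_refl _
      · exact hpair.1 y hy
    have hpop_le : ∀ x ∈ pop, x.1 ≤ t :=
      fun x hx => hps x hx (t, o) List.mem_cons_self
    have hft : pvEaten food t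
        = (pop.map (fun p => p.1)).sum + t * (((t, o) :: rest).length : Int) := by
      rw [hfe t]; exact pvSplit pop _ t hpop_le hrest_ge
    have hcond : total + (t - prev) * (((t, o) :: rest).length : Int) = pvEaten food t := by
      rw [htot, hft]; ring
    simp only [pvEatLoop]
    by_cases hc : t ≤ tstar
    · have hle : total + (t - prev) * (((t, o) :: rest).length : Int) ≤ k := by
        rw [hcond]; exact (hts t).mpr hc
      rw [if_pos hle]
      have hlen : (((t, o) :: rest).length : Int) - 1 = (rest.length : Int) := by
        simp
      rw [hlen]
      have hfilter : ((t, o) :: rest).filter (fun y => decide (tstar < y.1))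
          = rest.filter (fun y => decide (tstar < y.1)) := by
        simp [show ¬ tstar < t by omega]
      rw [hfilter] at *
      have := ih (pop ++ [(t, o)]) t (total + (t - prev) * (((t, o) :: rest).length : Int))
        (by rw [hcond, hft]; simp [List.map_append]; ring)
        (by intro u; rw [hfe u]; congr 1; simp)
        (by
          intro x hx y hy
          rcases List.mem_append.mp hx with hx | hx
          · exact hps x hx y (List.mem_cons_of_mem _ hy)
          · simp at hx; subst hx; exact hpair.1 y hy)
        (by
          intro x hx
          rcases List.mem_append.mp hx with hx | hx
          · exact hpt x hx
          · simp at hx; subst hx; exact hc)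
        hpair.2
      exact this
    · have hgt : ¬ (total + (t - prev) * (((t, o) :: rest).length : Int) ≤ k) := by
        rw [hcond]; intro hcontra; exact hc ((hts t).mp hcontra)
      rw [if_neg hgt]
      have hfself : ((t, o) :: rest).filter (fun y => decide (tstar < y.1))
          = (t, o) :: rest := by
        apply List.filter_eq_self.mpr
        intro a ha
        have := hrest_ge a ha
        simp; omega
      refine ⟨prev - tstar, ?_⟩
      rw [hfself]
      have hfts : pvEaten food tstar
          = (pop.map (fun p => p.1)).sum + tstar * (((t, o) :: rest).length : Int) := by
        rw [hfe tstar]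
        exact pvSplit pop _ tstar hpt (fun y hy => by have := hrest_ge y hy; omega)
      refine Prod.ext rfl (Prod.ext ?_ rfl)
      simp only
      rw [hfts, htot]; ring

-- the binary search lands on the last t with eaten(t) ≤ k
theorem pvSearchGo_spec (food : List Int) (k : Int) :
    ∀ (n : Nat) (lo hi : Int), (hi - lo).toNat ≤ n →
      pvEaten food lo ≤ k → k < pvEaten food hi → lo < hi →
      pvEaten food (pvSearchGo food k n lo hi) ≤ k ∧
        k < pvEaten food (pvSearchGo food k n lo hi + 1) := by
  intro n
  induction n with
  | zero => intro lo hi h1 _ _ h4; omega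
  | succ n ih =>
    intro lo hi h1 hlo hhi hlt
    simp only [pvSearchGo]
    by_cases hgt : 1 < hi - lo
    · rw [if_pos hgt]
      have hm1 : lo + 1 ≤ PySem.Int.floordiv (lo + hi) 2 :=
        (PySem.Int.le_floordiv_iff_mul_le (by omega)).mpr (by omega)
      have hm2 : PySem.Int.floordiv (lo + hi) 2 < hi :=
        (PySem.Int.floordiv_lt_iff_lt_mul (by omega)).mpr (by omega)
      by_cases hc : pvEaten food (PySem.Int.floordiv (lo + hi) 2) ≤ k
      · rw [if_pos hc]
        exact ih _ hi (by omega) hc hhi (by omega)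
      · rw [if_neg hc]
        exact ih lo _ (by omega) hlo (by omega) (by omega)
    · rw [if_neg hgt]
      have hhi1 : hi = lo + 1 := by omega
      exact ⟨hlo, hhi1 ▸ hhi⟩

theorem pvSearch_spec (food : List Int) (k : Int) (lo hi : Int)
    (hlo : pvEaten food lo ≤ k) (hhi : k < pvEaten food hi) (hlt : lo < hi) :
    pvEaten food (pvSearch food k lo hi) ≤ k ∧
      k < pvEaten food (pvSearch food k lo hi + 1) :=
  pvSearchGo_spec food k (hi - lo).toNat lo hi le_rfl hlo hhi hlt

-- shifting by a multiple of the modulus leaves Python's % unchanged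
theorem pvModShift (a c b : Int) : PySem.Int.mod (a + c * b) b = PySem.Int.mod a b := by
  simp [PySem.Int.mod]

theorem solution_eq_alt (food_times : List Int) (k : Int)
    (hpre : Pre_solution food_times k) :
    solution food_times k = solution_alt food_times k := by
  obtain ⟨hne, hemp⟩ := hpre
  by_cases hs : food_times.sum < k
  · unfold solution solution_alt
    simp [hs]
  · have hsumgt : k < food_times.sum := by omega
    have hnil : food_times ≠ [] := by
      intro h; subst h; simp at hsumgt; exact absurd (hemp rfl) (by omega)
    have hlen_pos : 0 < food_times.length := List.length_pos_iff.mpr hnil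
    -- abbreviations
    set L := (PySem.List.enumerate food_times 0).map (fun p => (p.2, p.1 + 1)) with hL
    set P := PySem.List.sorted2 L (fun x => x.1) (fun x => x.2) false with hP
    have hPperm : P.Perm L := PySem.List.sorted2_perm L _ _ false
    -- the maximum
    obtain ⟨m, hm⟩ : ∃ m, PySem.List.max? food_times (fun v => v) = some m := by
      cases hmx : PySem.List.max? food_times (fun v => v) with
      | none => exact absurd ((PySem.List.max?_eq_none_iff _ _).mp hmx) hnil
      | some m => exact ⟨m, rfl⟩
    have hmax : ∀ y ∈ food_times, y ≤ m := PySem.List.max?_isMax hm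
    have hfm : pvEaten food_times m = food_times.sum := by
      unfold pvEaten
      rw [List.map_congr_left (fun v hv => min_eq_left (hmax v hv))]
      simp
    -- the lower end
    set lo0 := PySem.Int.floordiv k (food_times.length : Int) with hlo0
    have hflo : pvEaten food_times lo0 ≤ k := by
      have h1 : pvEaten food_times lo0 ≤ (food_times.map (fun _ => lo0)).sum :=
        List.sum_le_sum (fun i _ => min_le_right i lo0)
      rw [PySem.List.sum_map_const_int] at h1
      have h2 := PySem.Int.floordiv_mul_add_mod k (food_times.length : Int)
      have h3 := PySem.Int.mod_nonneg k (b := (food_times.length : Int)) (by exact_mod_cast hlen_pos)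
      rw [← hlo0] at h2
      nlinarith [h1, h2, h3]
    have hfhi : k < pvEaten food_times m := by rw [hfm]; exact hsumgt
    have hlohi : lo0 < m := by
      by_contra hcon
      have := pvEaten_mono food_times (show m ≤ lo0 by omega)
      omega
    -- the threshold
    set tstar := pvSearch food_times k lo0 m with htstar
    have hspec := pvSearch_spec food_times k lo0 m hflo hfhi hlohi
    rw [← htstar] at hspec
    have hts : ∀ v : Int, pvEaten food_times v ≤ k ↔ v ≤ tstar := by
      intro v
      constructor
      · intro hv
        by_contra hcon
        have := pvEaten_mono food_times (show tstar + 1 ≤ v by omega)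
        omega
      · intro hv
        exact le_trans (pvEaten_mono food_times hv) hspec.1
    -- A's pop loop
    have hfe0 : ∀ t : Int, pvEaten food_times t
        = ((([] : List (Int × Int)) ++ P).map (fun p => min p.1 t)).sum := by
      intro t
      rw [List.nil_append]
      have h1 : (P.map (fun p => min p.1 t)).sum = (L.map (fun p => min p.1 t)).sum :=
        (hPperm.map _).sum_eq
      rw [h1, hL, List.map_map]
      unfold pvEaten
      have h2 : food_times.map (fun v => min v t)
          = (PySem.List.enumerate food_times 0).map
              ((fun v => min v t) ∘ (fun x => x.2)) := by
        rw [← List.map_map, PySem.List.map_snd_enumerate]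
      rw [h2]
      rfl
    obtain ⟨c, hc⟩ := pvEatLoop_spec food_times k tstar hts P [] 0 0 (by simp) hfe0
      (by intro x hx; simp at hx) (by intro x hx; simp at hx)
      (pvSorted2_pairwise L)
    -- the surviving lists
    set F := P.filter (fun y => decide (tstar < y.1)) with hF
    have hLF : L.filter (fun y => decide (tstar < y.1))
        = ((PySem.List.enumerate food_times 0).filter
            (fun p => decide (tstar < p.2))).map (fun p => (p.2, p.1 + 1)) := by
      rw [hL, List.filter_map]
      rfl
    have hFperm : (L.filter (fun y => decide (tstar < y.1))).Perm F :=
      (hPperm.filter _).symm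
    have hLpair : (L.filter (fun y => decide (tstar < y.1))).Pairwise
        (fun a b => a.2 < b.2) := by
      apply List.Pairwise.filter
      rw [hL]
      exact (PySem.List.pairwise_lt_enumerate food_times 0).map _
        (fun a b hab => by simpa using hab)
    have hsortF : PySem.List.sorted F (fun x => x.2) false
        = L.filter (fun y => decide (tstar < y.1)) :=
      PySem.List.sorted_eq_of_perm_of_pairwise_lt F _ _ hFperm hLpair
    have hlen : ((L.filter (fun y => decide (tstar < y.1))).length : Int)
        = (F.length : Int) := by rw [hFperm.length_eq]
    -- the two sides
    have hA : solution food_times k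
        = (PySem.List.pyGetD (L.filter (fun y => decide (tstar < y.1)))
            (PySem.Int.mod (k - (pvEaten food_times tstar + c * (F.length : Int)))
              (F.length : Int)) (0, 0)).2 := by
      unfold solution
      rw [if_neg hs, pvPush_eq_sorted2 food_times, ← hL, ← hP]
      simp only [hc, hsortF]
    have hB : solution_alt food_times k
        = (PySem.List.pyGetD (L.filter (fun y => decide (tstar < y.1)))
            (PySem.Int.mod (k - pvEaten food_times tstar) (F.length : Int)) (0, 0)).2 := by
      unfold solution_alt
      rw [if_neg hs]
      simp only [PySem.List.len_eq, hm, Option.getD_some, ← hlo0, ← htstar, ← hLF, hlen]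
    rw [hA, hB]
    congr 2
    have : k - (pvEaten food_times tstar + c * (F.length : Int))
        = (k - pvEaten food_times tstar) + (-c) * (F.length : Int) := by ring
    rw [this, pvModShift]

-- ===== VERDICT (by name: the statement is the Claim_ definition above) =====
theorem solution_spec : Claim_equal_solution := by
  intro food_times k _ hpre
  unfold Spec_solution
  exact solution_eq_alt food_times k hpre
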